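-- pv_equiv track=rewrite | github.com/adrianco/meGPT | processors/youtube_playlist_processor.py | extract_technical_tags
-- ===== SOURCE A (Python) =====
-- def extract_technical_tags(title):
--     """Extract technical tags from video title."""
--     technical_terms = {
--         'cloud', 'aws', 'azure', 'gcp', 'microservices', 'devops', 'kubernetes',
--         'docker', 'containers', 'serverless', 'ai', 'ml', 'sustainability',
--         'netflix', 'architecture', 'platform', 'engineering', 'monitoring',
--         'performance', 'scaling', 'resilience', 'hpc', 'podcast', 'video',
--         'machine learning', 'artificial intelligence', 'data science', 'big data',
--         'distributed systems', 'cloud native', 'infrastructure', 'security',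
--         'automation', 'ci/cd', 'continuous integration', 'continuous deployment',
--         'agile', 'scrum', 'lean', 'kanban', 'sre', 'site reliability',
--         'observability', 'logging', 'metrics', 'tracing', 'apm'
--     }
--
--     tags = set()
--     title_lower = title.lower()
--
--     # Extract single word terms
--     title_words = title_lower.split()
--     title_words = [word.strip('.,!?()[]{}":;') for word in title_words]
--     tags.update(word for word in title_words if word in technical_terms)
--
--     # Extract multi-word terms
--     for term in technical_terms:
--         if ' ' in term and term in title_lower:
--             tags.add(term)
--
--     return sorted(list(tags))
-- ===== SOURCE B (Python) =====
-- # Two-pointer merges over pre-sorted term tables instead of sets + final sort.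
-- _PUNCT = '.,!?()[]{}":;'
--
-- _ALL_TERMS = (
--     'cloud', 'aws', 'azure', 'gcp', 'microservices', 'devops', 'kubernetes',
--     'docker', 'containers', 'serverless', 'ai', 'ml', 'sustainability',
--     'netflix', 'architecture', 'platform', 'engineering', 'monitoring',
--     'performance', 'scaling', 'resilience', 'hpc', 'podcast', 'video',
--     'machine learning', 'artificial intelligence', 'data science', 'big data',
--     'distributed systems', 'cloud native', 'infrastructure', 'security',
--     'automation', 'ci/cd', 'continuous integration', 'continuous deployment',
--     'agile', 'scrum', 'lean', 'kanban', 'sre', 'site reliability',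
--     'observability', 'logging', 'metrics', 'tracing', 'apm',
-- )
--
-- # sorted single-word and multi-word term tables, precomputed
-- _SINGLE = tuple(sorted(t for t in _ALL_TERMS if ' ' not in t))
-- _MULTI = tuple(sorted(t for t in _ALL_TERMS if ' ' in t))
--
--
-- def extract_technical_tags(title):
--     """Extract technical tags from video title."""
--     title_lower = title.lower()
--     words = sorted(w.strip(_PUNCT) for w in title_lower.split())
--
--     # sorted-merge intersection of the sorted word list with the sorted
--     # single-word term table (emits each matched term exactly once)
--     single = []
--     i = j = 0
--     while i < len(words) and j < len(_SINGLE):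
--         if words[i] < _SINGLE[j]:
--             i += 1
--         elif _SINGLE[j] < words[i]:
--             j += 1
--         else:
--             single.append(_SINGLE[j])
--             i += 1
--             j += 1
--
--     multi = [t for t in _MULTI if t in title_lower]
--
--     # merge the two already-sorted disjoint result lists; no final sort needed
--     out = []
--     i = j = 0
--     while i < len(single) and j < len(multi):
--         if single[i] < multi[j]:
--             out.append(single[i])
--             i += 1
--         else:
--             out.append(multi[j])
--             j += 1
--     return out + single[i:] + multi[j:]
-- ===== Notes on version B (the rewrite author's own statement) =====
-- stated objective: alternative
-- what changed: B pre-sorts the term table into single-word and multi-word lists and replaces A's sets and final sorted() with two-pointer merges: a sorted-merge intersection of the sorted cleaned title words with the single-word table, plus a merge of the two already-sorted disjoint match lists, so no set and no final sort is used.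
import Mathlib
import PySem

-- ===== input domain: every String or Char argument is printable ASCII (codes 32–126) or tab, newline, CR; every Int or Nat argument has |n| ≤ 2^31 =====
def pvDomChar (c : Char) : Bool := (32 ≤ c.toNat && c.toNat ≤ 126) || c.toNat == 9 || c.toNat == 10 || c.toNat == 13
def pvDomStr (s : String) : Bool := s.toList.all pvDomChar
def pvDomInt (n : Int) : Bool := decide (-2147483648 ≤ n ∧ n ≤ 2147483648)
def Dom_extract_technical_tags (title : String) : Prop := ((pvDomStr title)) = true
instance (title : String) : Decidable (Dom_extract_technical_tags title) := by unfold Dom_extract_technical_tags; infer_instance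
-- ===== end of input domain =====

-- B replaces A's sets + final sorted() with two-pointer merges over pre-sorted
-- single-word / multi-word term tables; objective: alternative algorithm, same cost.

-- the literal term table of A (a Python set literal of distinct strings, in source order)
def techTermsList : List String :=
  ["cloud", "aws", "azure", "gcp", "microservices", "devops", "kubernetes",
   "docker", "containers", "serverless", "ai", "ml", "sustainability",
   "netflix", "architecture", "platform", "engineering", "monitoring",
   "performance", "scaling", "resilience", "hpc", "podcast", "video",
   "machine learning", "artificial intelligence", "data science", "big data",
   "distributed systems", "cloud native", "infrastructure", "security",
   "automation", "ci/cd", "continuous integration", "continuous deployment",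
   "agile", "scrum", "lean", "kanban", "sre", "site reliability",
   "observability", "logging", "metrics", "tracing", "apm"]

-- ===== PORT A =====
def extract_technical_tags (title : String) : List String :=
  let technical_terms : List String := PySem.Set.ofList techTermsList
  let tags : List String := PySem.Set.empty
  let title_lower := PySem.Str.lower title
  let title_words := PySem.Str.split₀ title_lower
  let title_words := title_words.map (fun word => PySem.Str.stripChars word ".,!?()[]{}\":;")
  let tags := PySem.Set.update tags
    (title_words.filter (fun word => PySem.Set.contains technical_terms word))
  let tags := technical_terms.foldl (fun tags term =>
      if PySem.Str.isIn " " term && PySem.Str.isIn term title_lower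
      then PySem.Set.add tags term else tags) tags
  PySem.List.sorted tags (fun x => x) false

-- ===== PORT B =====
-- B's precomputed tables: _SINGLE = tuple(sorted(t for t in _ALL_TERMS if ' ' not in t))
def pvSingleTerms : List String :=
  ["agile", "ai", "apm", "architecture", "automation", "aws", "azure", "ci/cd",
   "cloud", "containers", "devops", "docker", "engineering", "gcp", "hpc",
   "infrastructure", "kanban", "kubernetes", "lean", "logging", "metrics",
   "microservices", "ml", "monitoring", "netflix", "observability", "performance",
   "platform", "podcast", "resilience", "scaling", "scrum", "security",
   "serverless", "sre", "sustainability", "tracing", "video"]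

-- _MULTI = tuple(sorted(t for t in _ALL_TERMS if ' ' in t))
def pvMultiTerms : List String :=
  ["artificial intelligence", "big data", "cloud native", "continuous deployment",
   "continuous integration", "data science", "distributed systems",
   "machine learning", "site reliability"]

-- Source B's first while loop: two-pointer intersection of two sorted lists
-- (the i/j pointers become the consumed list suffixes)
def pvMergeInter : List String → List String → List String
  | [], _ => []
  | _ :: _, [] => []
  | w :: ws, t :: ts =>
    if w < t then pvMergeInter ws (t :: ts)
    else if t < w then pvMergeInter (w :: ws) ts
    else t :: pvMergeInter ws ts
termination_by ws ts => ws.length + ts.length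

-- Source B's second while loop (+ the trailing `out + single[i:] + multi[j:]`)
def pvMerge2 : List String → List String → List String
  | [], ms => ms
  | s :: ss, [] => s :: ss
  | s :: ss, m :: ms =>
    if s < m then s :: pvMerge2 ss (m :: ms)
    else m :: pvMerge2 (s :: ss) ms
termination_by ss ms => ss.length + ms.length

def extract_technical_tags_alt (title : String) : List String :=
  let title_lower := PySem.Str.lower title
  let words := PySem.List.sorted
    ((PySem.Str.split₀ title_lower).map (fun w => PySem.Str.stripChars w ".,!?()[]{}\":;"))
    (fun x => x) false
  let single := pvMergeInter words pvSingleTerms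
  let multi := pvMultiTerms.filter (fun t => PySem.Str.isIn t title_lower)
  pvMerge2 single multi

-- ===== PRECONDITION & SPEC =====
def Spec_extract_technical_tags (title : String) (out : List String) : Prop := out = extract_technical_tags_alt title
instance (title : String) (out : List String) : Decidable (Spec_extract_technical_tags title out) := by unfold Spec_extract_technical_tags; infer_instance

-- ===== CLAIM (what is proved, stated in full; the proofs are below) =====
def Claim_equal_extract_technical_tags : Prop := ∀ (title : String), Dom_extract_technical_tags title → Spec_extract_technical_tags title (extract_technical_tags title)

-- ===== LEMMAS AND PROOFS =====

-- membership in a conditional-add fold over a list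
theorem mem_foldl_cond_add (l : List String) (c : String → Bool) :
    ∀ (s : List String) (x : String),
      x ∈ l.foldl (fun s t => if c t then PySem.Set.add s t else s) s ↔
        x ∈ s ∨ (x ∈ l ∧ c x = true) := by
  induction l with
  | nil => simp
  | cons h t ih =>
    intro s x
    simp only [List.foldl_cons]
    by_cases hc : c h = true
    · rw [hc, if_pos rfl, ih]
      simp only [PySem.Set.mem_add, List.mem_cons]
      constructor
      · rintro (⟨hs | rfl⟩ | ⟨ht, hcx⟩)
        · exact Or.inl hs
        · exact Or.inr ⟨Or.inl rfl, hc⟩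
        · exact Or.inr ⟨Or.inr ht, hcx⟩
      · rintro (hs | ⟨(rfl | ht), hcx⟩)
        · exact Or.inl (Or.inl hs)
        · exact Or.inl (Or.inr rfl)
        · exact Or.inr ⟨ht, hcx⟩
    · rw [if_neg hc, ih]
      simp only [List.mem_cons]
      constructor
      · rintro (hs | ⟨ht, hcx⟩)
        · exact Or.inl hs
        · exact Or.inr ⟨Or.inr ht, hcx⟩
      · rintro (hs | ⟨(rfl | ht), hcx⟩)
        · exact Or.inl hs
        · exact absurd hcx hc
        · exact Or.inr ⟨ht, hcx⟩

theorem nodup_foldl_cond_add (l : List String) (c : String → Bool) :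
    ∀ (s : List String), s.Nodup →
      (l.foldl (fun s t => if c t then PySem.Set.add s t else s) s).Nodup := by
  induction l with
  | nil => intro s hs; simpa using hs
  | cons h t ih =>
    intro s hs
    simp only [List.foldl_cons]
    split_ifs with hc
    · exact ih _ (PySem.Set.nodup_add _ _ hs)
    · exact ih _ hs

-- words produced by split₀ contain no whitespace character
theorem split₀_go_no_space :
    ∀ (s cur : List Char) (acc : List (List Char)),
      (∀ c ∈ cur, PySem.Chars.isspace c = false) →
      (∀ w ∈ acc, ∀ c ∈ w, PySem.Chars.isspace c = false) →
      ∀ w ∈ PySem.Chars.split₀.go s cur acc, ∀ c ∈ w, PySem.Chars.isspace c = false := by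
  intro s
  induction s with
  | nil =>
    intro cur acc hcur hacc w hw
    unfold PySem.Chars.split₀.go at hw
    split_ifs at hw with h
    · rw [List.mem_reverse] at hw; exact hacc w hw
    · rw [List.mem_reverse, List.mem_cons] at hw
      rcases hw with rfl | hw
      · intro c hc; rw [List.mem_reverse] at hc; exact hcur c hc
      · exact hacc w hw
  | cons ch rest ih =>
    intro cur acc hcur hacc w hw
    unfold PySem.Chars.split₀.go at hw
    by_cases hsp : PySem.Chars.isspace ch = true
    · rw [if_pos hsp] at hw
      split_ifs at hw with hemp
      · exact ih [] acc (by simp) hacc w hw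
      · refine ih [] (cur.reverse :: acc) (by simp) ?_ w hw
        intro w' hw' c hc
        rcases List.mem_cons.mp hw' with rfl | hw'
        · rw [List.mem_reverse] at hc; exact hcur c hc
        · exact hacc w' hw' c hc
    · rw [if_neg hsp] at hw
      refine ih (ch :: cur) acc ?_ hacc w hw
      intro c hc
      rcases List.mem_cons.mp hc with rfl | hc
      · exact eq_false_of_ne_true hsp
      · exact hcur c hc

theorem split₀_no_space (s : List Char) :
    ∀ w ∈ PySem.Chars.split₀ s, ∀ c ∈ w, PySem.Chars.isspace c = false := by
  intro w hw
  exact split₀_go_no_space s [] [] (by simp) (by simp) w hw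

theorem mem_of_mem_stripChars (s chars : List Char) (c : Char)
    (h : c ∈ PySem.Chars.stripChars s chars) : c ∈ s := by
  unfold PySem.Chars.stripChars at h
  rw [List.mem_reverse] at h
  have h1 := (List.dropWhile_sublist _).mem h
  rw [List.mem_reverse] at h1
  exact (List.dropWhile_sublist _).mem h1

-- a cleaned title word never contains a space
theorem cleaned_word_no_space (tl : String) (x : String)
    (hx : x ∈ (PySem.Str.split₀ tl).map (fun w => PySem.Str.stripChars w ".,!?()[]{}\":;")) :
    ¬ (' ' ∈ x.toList) := by
  intro hsp
  rcases List.mem_map.mp hx with ⟨w, hw, rfl⟩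
  rw [PySem.Str.toList_stripChars] at hsp
  have hmem : ' ' ∈ w.toList := mem_of_mem_stripChars _ _ _ hsp
  have hw' : w.toList ∈ PySem.Chars.split₀ tl.toList := by
    rw [← PySem.Str.split₀_map_toList]
    exact List.mem_map_of_mem hw
  have := split₀_no_space tl.toList w.toList hw' ' ' hmem
  simp [PySem.Chars.isspace] at this

theorem isIn_space_iff (x : String) :
    PySem.Str.isIn " " x = true ↔ ' ' ∈ x.toList := by
  rw [PySem.Str.isIn_iff_infix]
  constructor
  · intro h
    exact h.mem (by decide)
  · intro h
    rcases List.append_of_mem h with ⟨l1, l2, hx⟩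
    exact ⟨l1, l2, by rw [hx]; simp⟩

-- B's merge machinery
theorem pvMergeInter_sublist : ∀ (ws ts : List String), List.Sublist (pvMergeInter ws ts) ts := by
  intro ws ts
  fun_induction pvMergeInter ws ts with
  | case1 => simp
  | case2 => simp
  | case3 w ws t ts h ih => exact ih
  | case4 w ws t ts h1 h2 ih => exact ih.trans (List.sublist_cons_self t ts)
  | case5 w ws t ts h1 h2 ih => exact ih.cons₂ t

theorem mem_pvMergeInter (ws ts : List String) (hws : ws.Pairwise (· ≤ ·))
    (hts : ts.Pairwise (· < ·)) (x : String) :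
    x ∈ pvMergeInter ws ts ↔ x ∈ ws ∧ x ∈ ts := by
  fun_induction pvMergeInter ws ts with
  | case1 => simp
  | case2 => simp
  | case3 w ws t ts h ih =>
    rcases List.pairwise_cons.mp hws with ⟨hwle, hws'⟩
    rw [ih hws' hts]
    constructor
    · rintro ⟨h1, h2⟩; exact ⟨List.mem_cons_of_mem _ h1, h2⟩
    · rintro ⟨h1, h2⟩
      rcases List.mem_cons.mp h1 with rfl | h1
      · exfalso
        rcases List.mem_cons.mp h2 with rfl | h2
        · exact lt_irrefl _ h
        · exact absurd (h.trans ((List.pairwise_cons.mp hts).1 _ h2)) (lt_irrefl _)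
      · exact ⟨h1, h2⟩
  | case4 w ws t ts h1 h2 ih =>
    rw [ih hws (List.pairwise_cons.mp hts).2]
    constructor
    · rintro ⟨ha, hb⟩; exact ⟨ha, List.mem_cons_of_mem _ hb⟩
    · rintro ⟨ha, hb⟩
      rcases List.mem_cons.mp hb with rfl | hb
      · exfalso
        rcases List.mem_cons.mp ha with rfl | ha
        · exact lt_irrefl _ h2
        · exact absurd (h2.trans_le ((List.pairwise_cons.mp hws).1 _ ha)) (lt_irrefl _)
      · exact ⟨ha, hb⟩
  | case5 w ws t ts h1 h2 ih =>
    have heq : w = t := le_antisymm (not_lt.mp h2) (not_lt.mp h1)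
    subst heq
    rw [List.mem_cons, ih (List.pairwise_cons.mp hws).2 (List.pairwise_cons.mp hts).2]
    constructor
    · rintro (rfl | ⟨ha, hb⟩)
      · exact ⟨List.mem_cons_self, List.mem_cons_self⟩
      · exact ⟨List.mem_cons_of_mem _ ha, List.mem_cons_of_mem _ hb⟩
    · rintro ⟨ha, hb⟩
      rcases List.mem_cons.mp hb with heq | hb
      · exact Or.inl heq
      · rcases List.mem_cons.mp ha with heq | ha
        · exact absurd (heq ▸ (List.pairwise_cons.mp hts).1 x hb) (lt_irrefl _)
        · exact Or.inr ⟨ha, hb⟩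

theorem mem_pvMerge2 (ss ms : List String) (x : String) :
    x ∈ pvMerge2 ss ms ↔ x ∈ ss ∨ x ∈ ms := by
  fun_induction pvMerge2 ss ms with
  | case1 => simp
  | case2 => simp
  | case3 s ss m ms h ih => simp [List.mem_cons, ih]; tauto
  | case4 s ss m ms h ih => simp [List.mem_cons, ih]; tauto

theorem pairwise_pvMerge2 (ss ms : List String) (h1 : ss.Pairwise (· < ·))
    (h2 : ms.Pairwise (· < ·)) (hd : ∀ x ∈ ss, ∀ y ∈ ms, x ≠ y) :
    (pvMerge2 ss ms).Pairwise (· < ·) := by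
  fun_induction pvMerge2 ss ms with
  | case1 => exact h2
  | case2 => exact h1
  | case3 s ss m ms h ih =>
    refine List.pairwise_cons.mpr ⟨?_, ih (List.pairwise_cons.mp h1).2 h2
      (fun x hx y hy => hd x (List.mem_cons_of_mem _ hx) y hy)⟩
    intro y hy
    rcases (mem_pvMerge2 _ _ y).mp hy with hy | hy
    · exact (List.pairwise_cons.mp h1).1 _ hy
    · rcases List.mem_cons.mp hy with rfl | hy
      · exact h
      · exact h.trans ((List.pairwise_cons.mp h2).1 _ hy)
  | case4 s ss m ms h ih =>
    have hms : m < s := lt_of_le_of_ne (not_lt.mp h)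
      (fun he => hd s List.mem_cons_self m List.mem_cons_self he.symm)
    refine List.pairwise_cons.mpr ⟨?_, ih h1 (List.pairwise_cons.mp h2).2
      (fun x hx y hy => hd x hx y (List.mem_cons_of_mem _ hy))⟩
    intro y hy
    rcases (mem_pvMerge2 _ _ y).mp hy with hy | hy
    · rcases List.mem_cons.mp hy with rfl | hy
      · exact hms
      · exact hms.trans ((List.pairwise_cons.mp h1).1 _ hy)
    · exact (List.pairwise_cons.mp h2).1 _ hy

-- facts about the literal tables
theorem single_pairwise : pvSingleTerms.Pairwise (· < ·) :=
  List.Pairwise.imp (fun h => String.lt_iff_toList_lt.mpr h)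
    (show pvSingleTerms.Pairwise (fun a b => a.toList < b.toList) by decide)
theorem multi_pairwise : pvMultiTerms.Pairwise (· < ·) :=
  List.Pairwise.imp (fun h => String.lt_iff_toList_lt.mpr h)
    (show pvMultiTerms.Pairwise (fun a b => a.toList < b.toList) by decide)
theorem single_sub : ∀ x ∈ pvSingleTerms,
    x ∈ techTermsList ∧ PySem.Str.isIn " " x = false := by decide
theorem multi_sub : ∀ x ∈ pvMultiTerms,
    x ∈ techTermsList ∧ PySem.Str.isIn " " x = true := by decide
theorem terms_split : ∀ x ∈ techTermsList,
    (if PySem.Str.isIn " " x = true then x ∈ pvMultiTerms else x ∈ pvSingleTerms) := by decide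

theorem extract_technical_tags_eq (title : String) :
    extract_technical_tags title = extract_technical_tags_alt title := by
  unfold extract_technical_tags extract_technical_tags_alt
  simp only []
  set tl := PySem.Str.lower title with htl
  set cleaned : List String :=
    (PySem.Str.split₀ tl).map (fun w => PySem.Str.stripChars w ".,!?()[]{}\":;") with hcl
  set words := PySem.List.sorted cleaned (fun x => x) false with hwords
  set single := pvMergeInter words pvSingleTerms with hsingle
  set multi := pvMultiTerms.filter (fun t => PySem.Str.isIn t tl) with hmulti
  have hwordsPw : words.Pairwise (· ≤ ·) := PySem.List.sorted_pairwise cleaned (fun x => x)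
  have hsinglePw : single.Pairwise (· < ·) :=
    List.Pairwise.sublist (pvMergeInter_sublist words pvSingleTerms) single_pairwise
  have hmultiPw : multi.Pairwise (· < ·) :=
    List.Pairwise.sublist List.filter_sublist multi_pairwise
  have hdisj : ∀ x ∈ single, ∀ y ∈ multi, x ≠ y := by
    intro x hx y hy he
    have hx' := ((mem_pvMergeInter _ _ hwordsPw single_pairwise x).mp hx).2
    have hy' := (List.mem_filter.mp hy).1
    have h1 := (single_sub x hx').2
    have h2 := (multi_sub y hy').2
    rw [he, h2] at h1
    simp at h1
  have houtPw : (pvMerge2 single multi).Pairwise (· < ·) :=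
    pairwise_pvMerge2 _ _ hsinglePw hmultiPw hdisj
  apply PySem.List.sorted_eq_of_perm_of_pairwise_lt
  · -- the merged B output is a permutation of A's tags set
    have hnodA := nodup_foldl_cond_add (PySem.Set.ofList techTermsList)
      (fun term => PySem.Str.isIn " " term && PySem.Str.isIn term tl)
      (PySem.Set.update PySem.Set.empty
        (cleaned.filter (fun word => PySem.Set.contains (PySem.Set.ofList techTermsList) word)))
      (PySem.Set.nodup_update _ _ (by simp [PySem.Set.empty]))
    rw [List.perm_ext_iff_of_nodup (houtPw.imp ne_of_lt) hnodA]
    intro x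
    rw [mem_pvMerge2, mem_foldl_cond_add]
    simp only [PySem.Set.mem_update, List.mem_filter, PySem.Set.mem_ofList,
      PySem.Set.contains_iff, hsingle]
    rw [mem_pvMergeInter _ _ hwordsPw single_pairwise]
    rw [hwords, PySem.List.mem_sorted, hmulti]
    constructor
    · rintro (⟨hcw, hs⟩ | hmf)
      · exact Or.inl (Or.inr ⟨hcw, (single_sub x hs).1⟩)
      · rcases List.mem_filter.mp hmf with ⟨hm, hsub⟩
        exact Or.inr ⟨(multi_sub x hm).1,
          by rw [Bool.and_eq_true]; exact ⟨(multi_sub x hm).2, hsub⟩⟩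
    · rintro ((hemp | ⟨hcw, hterm⟩) | ⟨hterm, hcond⟩)
      · simp [PySem.Set.empty] at hemp
      · have hnosp : PySem.Str.isIn " " x = false := by
          by_cases hsp : PySem.Str.isIn " " x = true
          · exact absurd ((isIn_space_iff x).mp hsp) (cleaned_word_no_space tl x hcw)
          · exact eq_false_of_ne_true hsp
        have := terms_split x hterm
        rw [hnosp] at this
        simp only [Bool.false_eq_true, if_false] at this
        exact Or.inl ⟨hcw, this⟩
      · rw [Bool.and_eq_true] at hcond
        have := terms_split x hterm
        rw [hcond.1, if_pos rfl] at this
        exact Or.inr (List.mem_filter.mpr ⟨this, hcond.2⟩)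
  · exact houtPw

-- ===== VERDICT (by name: the statement is the Claim_ definition above) =====
theorem extract_technical_tags_spec : Claim_equal_extract_technical_tags := by
  intro title _
  unfold Spec_extract_technical_tags
  exact extract_technical_tags_eq title
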